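-- pv_equiv track=rewrite | github.com/GareemaRanjan/coding_practice | shaquille/capital/Question_1.py | solution
-- ===== SOURCE A (Python) =====
-- def solution(commands):
--     # Initialize the robot's position to 0
--     position = 0
--
--     # Iterate over each command in the string
--     for command in commands:
--         if command == 'R':
--             position += 1  # Move right
--         elif command == 'L':
--             position -= 1  # Move left
--
--     # Determine the final position
--     if position > 0:
--         return "R"
--     elif position < 0:
--         return "L"
--     else:
--         return ""  # Robot is at the starting point
-- ===== SOURCE B (Python) =====
-- def solution(commands):
--     # Sort the relevant moves ('L' < 'R'); the majority move, if any, occupies the middle.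
--     moves = sorted(c for c in commands if c in ('L', 'R'))
--     n = len(moves)
--     if n == 0:
--         return ""
--     mid = n // 2
--     if n % 2 == 1:
--         return moves[mid]
--     return moves[mid] if moves[mid - 1] == moves[mid] else ""
-- ===== Notes on version B (the rewrite author's own statement) =====
-- stated objective: alternative
-- what changed: Instead of tallying a signed position, B sorts the L/R moves and reads the majority off the middle of the sorted list (median of a two-valued multiset): an odd-length list's middle element is the majority move, an even-length list answers its middle pair if they agree and a tie otherwise.
import Mathlib
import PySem

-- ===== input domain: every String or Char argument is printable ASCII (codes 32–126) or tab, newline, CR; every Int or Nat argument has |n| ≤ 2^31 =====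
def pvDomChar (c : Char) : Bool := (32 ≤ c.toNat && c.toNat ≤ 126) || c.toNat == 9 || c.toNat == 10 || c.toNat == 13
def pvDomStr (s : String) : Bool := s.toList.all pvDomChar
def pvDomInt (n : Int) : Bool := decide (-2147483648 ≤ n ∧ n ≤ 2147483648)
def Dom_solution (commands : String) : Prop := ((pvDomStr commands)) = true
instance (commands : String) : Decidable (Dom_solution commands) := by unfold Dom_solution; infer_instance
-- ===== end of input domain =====

-- B replaces A's signed-tally loop by a sort-and-take-the-middle (median of the L/R multiset) algorithm; alternative decomposition, not faster.


-- ===== PORT A =====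
def solution (commands : String) : String :=
  let position : Int :=
    commands.toList.foldl
      (fun position command =>
        if command = 'R' then position + 1
        else if command = 'L' then position - 1
        else position) 0
  if position > 0 then "R"
  else if position < 0 then "L"
  else ""

-- ===== PORT B =====
def solution_alt (commands : String) : String :=
  let moves := PySem.List.sorted (commands.toList.filter (fun c => c == 'L' || c == 'R')) (fun x => x) false
  let n : Int := moves.length
  if n = 0 then ""
  else
    let mid := PySem.Int.floordiv n 2
    if PySem.Int.mod n 2 = 1 then
      match PySem.List.pyGet? moves mid with
      | some c => String.ofList [c]
      | none => ""          -- unreachable: mid is in range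
    else
      match PySem.List.pyGet? moves (mid - 1), PySem.List.pyGet? moves mid with
      | some a, some b => if a = b then String.ofList [b] else ""
      | _, _ => ""          -- unreachable: both indices in range

-- ===== PRECONDITION & SPEC =====
def Spec_solution (commands : String) (out : String) : Prop := out = solution_alt commands
instance (commands : String) (out : String) : Decidable (Spec_solution commands out) := by unfold Spec_solution; infer_instance

-- ===== CLAIM (what is proved, stated in full; the proofs are below) =====
def Claim_equal_solution : Prop := ∀ (commands : String), Dom_solution commands → Spec_solution commands (solution commands)

-- ===== LEMMAS AND PROOFS =====

-- canonical verdict from the two tallies (proof-only helper)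
def verdict (l r : Nat) : String := if l < r then "R" else if r < l then "L" else ""

-- A's loop invariant: the running position is acc + (#R − #L) of the list
theorem foldl_pos (l : List Char) (acc : Int) :
    l.foldl (fun position command =>
        if command = 'R' then position + 1
        else if command = 'L' then position - 1
        else position) acc
      = acc + (l.count 'R' : Int) - (l.count 'L' : Int) := by
  induction l generalizing acc with
  | nil => simp
  | cons hd tl ih =>
    simp only [List.foldl_cons, ih, List.count_cons]
    by_cases h1 : hd = 'R'
    · simp [h1]; ring
    · by_cases h2 : hd = 'L' <;> simp [h1, h2] <;> ring

theorem A_eq (commands : String) :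
    solution commands = verdict (commands.toList.count 'L') (commands.toList.count 'R') := by
  unfold solution verdict
  rw [foldl_pos]
  set l := commands.toList.count 'L'
  set r := commands.toList.count 'R'
  by_cases h1 : l < r
  · rw [if_pos (by omega : (0:Int) + (r:Int) - (l:Int) > 0), if_pos h1]
  · rw [if_neg (by omega : ¬ ((0:Int) + (r:Int) - (l:Int) > 0)), if_neg h1]
    by_cases h2 : r < l
    · rw [if_pos (by omega : (0:Int) + (r:Int) - (l:Int) < 0), if_pos h2]
    · rw [if_neg (by omega : ¬ ((0:Int) + (r:Int) - (l:Int) < 0)), if_neg h2]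

-- any list over {'L','R'} is a permutation of L^l ++ R^r with its own counts
theorem perm_two (xs : List Char) (h : ∀ x ∈ xs, x = 'L' ∨ x = 'R') :
    xs.Perm (List.replicate (xs.count 'L') 'L' ++ List.replicate (xs.count 'R') 'R') := by
  induction xs with
  | nil => simp
  | cons hd tl ih =>
    have htl : ∀ x ∈ tl, x = 'L' ∨ x = 'R' := fun x hx => h x (List.mem_cons_of_mem _ hx)
    rcases h hd (List.mem_cons_self) with hL | hR
    · subst hL
      simpa [List.count_cons, List.replicate_succ] using (ih htl).cons 'L'
    · subst hR
      have h2 := ((ih htl).cons 'R').trans List.perm_middle.symm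
      simpa [List.count_cons, List.replicate_succ] using h2

-- the sorted filtered list is exactly L^l ++ R^r
theorem moves_eq (cs : List Char) :
    PySem.List.sorted (cs.filter (fun c => c == 'L' || c == 'R')) (fun x => x) false
      = List.replicate (cs.count 'L') 'L' ++ List.replicate (cs.count 'R') 'R' := by
  have hmem : ∀ x ∈ cs.filter (fun c => c == 'L' || c == 'R'), x = 'L' ∨ x = 'R' := by
    intro x hx
    have := List.of_mem_filter hx
    simpa using this
  have hcL : (cs.filter (fun c => c == 'L' || c == 'R')).count 'L' = cs.count 'L' := by
    simp [List.count_filter]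
  have hcR : (cs.filter (fun c => c == 'L' || c == 'R')).count 'R' = cs.count 'R' := by
    simp [List.count_filter]
  have hperm := perm_two _ hmem
  rw [hcL, hcR] at hperm
  refine PySem.List.sorted_id_eq_of_perm_of_pairwise _ _ hperm.symm ?_
  refine List.pairwise_append.mpr ⟨?_, ?_, ?_⟩
  · exact List.pairwise_replicate.mpr (Or.inr le_rfl)
  · exact List.pairwise_replicate.mpr (Or.inr le_rfl)
  · intro a ha b hb
    rw [List.eq_of_mem_replicate ha, List.eq_of_mem_replicate hb]
    decide

-- element of L^l ++ R^r at a nat index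
theorem getRep (l r i : ℕ) (h : i < l + r) :
    (List.replicate l 'L' ++ List.replicate r 'R')[i]? = some (if i < l then 'L' else 'R') := by
  by_cases hi : i < l
  · rw [List.getElem?_append_left (by simpa using hi)]
    simp [hi]
  · rw [List.getElem?_append_right (by simpa using hi)]
    simp only [List.length_replicate, List.getElem?_replicate]
    rw [if_pos (by omega), if_neg hi]

theorem B_eq (commands : String) :
    solution_alt commands = verdict (commands.toList.count 'L') (commands.toList.count 'R') := by
  unfold solution_alt verdict
  rw [moves_eq]
  set l := commands.toList.count 'L' with hl
  set r := commands.toList.count 'R' with hr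
  simp only [List.length_append, List.length_replicate]
  have hfd : PySem.Int.floordiv ((l : Int) + (r : Int)) 2 = ((l : Int) + (r : Int)) / 2 :=
    PySem.Int.floordiv_eq_ediv_of_pos (by norm_num)
  have hmd : PySem.Int.mod ((l : Int) + (r : Int)) 2 = ((l : Int) + (r : Int)) % 2 :=
    PySem.Int.mod_eq_emod_of_pos (by norm_num)
  by_cases h0 : l + r = 0
  · have hl0 : l = 0 := by omega
    have hr0 : r = 0 := by omega
    simp [hl0, hr0]
  · rw [if_neg (by push_cast; omega)]
    rw [show ((l + r : ℕ) : Int) = (l : Int) + (r : Int) by push_cast; ring] at *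
    rw [hfd, hmd]
    have hmidnn : (0 : Int) ≤ ((l : Int) + (r : Int)) / 2 := by omega
    by_cases hodd : ((l : Int) + (r : Int)) % 2 = 1
    · rw [if_pos hodd]
      have hlt : (((l : Int) + (r : Int)) / 2).toNat < l + r := by omega
      rw [PySem.List.pyGet?_of_nonneg _ hmidnn, getRep l r _ hlt]
      by_cases hrl : l < r
      · rw [if_neg (by omega : ¬ ((((l : Int) + (r : Int)) / 2).toNat < l)), if_pos hrl]
      · rw [if_pos (by omega : (((l : Int) + (r : Int)) / 2).toNat < l), if_neg hrl,
            if_pos (by omega : r < l)]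
    · rw [if_neg hodd]
      have hmid1 : (1 : Int) ≤ ((l : Int) + (r : Int)) / 2 := by omega
      have h1nn : (0 : Int) ≤ ((l : Int) + (r : Int)) / 2 - 1 := by omega
      have hlt : (((l : Int) + (r : Int)) / 2).toNat < l + r := by omega
      have hlt1 : ((((l : Int) + (r : Int)) / 2) - 1).toNat < l + r := by omega
      rw [PySem.List.pyGet?_of_nonneg _ h1nn, PySem.List.pyGet?_of_nonneg _ hmidnn,
          getRep l r _ hlt1, getRep l r _ hlt]
      by_cases hEq : l = r
      · rw [if_pos (by omega : ((((l : Int) + (r : Int)) / 2) - 1).toNat < l),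
            if_neg (by omega : ¬ ((((l : Int) + (r : Int)) / 2).toNat < l)),
            if_neg (by omega : ¬ (l < r)), if_neg (by omega : ¬ (r < l))]
        simp
      · by_cases hrl : l < r
        · rw [if_neg (by omega : ¬ (((((l : Int) + (r : Int)) / 2) - 1).toNat < l)),
              if_neg (by omega : ¬ ((((l : Int) + (r : Int)) / 2).toNat < l)), if_pos hrl]
          simp
        · rw [if_pos (by omega : ((((l : Int) + (r : Int)) / 2) - 1).toNat < l),
              if_pos (by omega : (((l : Int) + (r : Int)) / 2).toNat < l),
              if_neg hrl, if_pos (by omega : r < l)]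
          simp

-- ===== VERDICT (by name: the statement is the Claim_ definition above) =====
theorem solution_spec : Claim_equal_solution := by
  intro commands _
  unfold Spec_solution
  rw [A_eq, B_eq]
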